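-- pv_equiv track=rewrite | github.com/tdsmith/homebrew-pypi-poet | poet/util.py | dash_to_studly
-- ===== SOURCE A (Python) =====
-- def dash_to_studly(s):
--     l = list(s)
--     l[0] = l[0].upper()
--     delims = "-_"
--     for i, c in enumerate(l):
--         if c in delims:
--             if (i+1) < len(l):
--                 l[i+1] = l[i+1].upper()
--     out = "".join(l)
--     for d in delims:
--         out = out.replace(d, "")
--     return out
-- ===== SOURCE B (Python) =====
-- def dash_to_studly(s):
--     out = []
--     cap = True
--     for c in s:
--         if c in "-_":
--             cap = True
--         else:
--             out.append(c.upper() if cap else c)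
--             cap = False
--     return "".join(out)
-- ===== Notes on version B (the rewrite author's own statement) =====
-- stated objective: simpler
-- what changed: A mutates a char list in place (uppercasing the char after each delimiter by index) and then strips delimiters with two str.replace passes; B is a single left-to-right pass with a capitalize-next flag that emits the result directly.
import Mathlib
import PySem

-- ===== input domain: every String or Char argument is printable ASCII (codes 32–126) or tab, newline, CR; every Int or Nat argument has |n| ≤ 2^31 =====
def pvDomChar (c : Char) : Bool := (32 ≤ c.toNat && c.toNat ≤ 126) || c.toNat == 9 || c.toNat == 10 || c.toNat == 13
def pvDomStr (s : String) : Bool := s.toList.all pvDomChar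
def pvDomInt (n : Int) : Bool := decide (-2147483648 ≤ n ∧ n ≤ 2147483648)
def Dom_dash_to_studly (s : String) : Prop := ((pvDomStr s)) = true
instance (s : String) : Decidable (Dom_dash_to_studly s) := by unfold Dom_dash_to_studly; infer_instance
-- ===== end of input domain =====

-- B replaces A's index-mutating mark pass + two str.replace strip passes by a single
-- left-to-right pass with a capitalize-next flag (objective: simpler); on "" A raises
-- IndexError (excluded by Pre_) while B returns ""; A does not mutate its argument.

-- ===== PORT A =====
def dash_to_studly (s : String) : String :=
  let l := s.toList
  -- l[0] = l[0].upper()  (on "" Python raises IndexError; those inputs are outside Pre_)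
  let l : List Char :=
    match l with
    | [] => []
    | c :: t => PySem.Chars.upperChar c :: t
  -- for i, c in enumerate(l): if c in delims: if (i+1) < len(l): l[i+1] = l[i+1].upper()
  let l := (List.range l.length).foldl (fun acc i =>
      if acc.getD i ' ' = '-' ∨ acc.getD i ' ' = '_' then
        if i + 1 < acc.length then
          acc.set (i + 1) (PySem.Chars.upperChar (acc.getD (i + 1) ' '))
        else acc
      else acc) l
  -- out = "".join(l); for d in delims: out = out.replace(d, "")
  let out := ['-', '_'].foldl (fun o d => PySem.Chars.replace o [d] []) l
  String.mk out

-- ===== PORT B =====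
def dash_to_studly_alt (s : String) : String :=
  let r := s.toList.foldl
    (fun (st : List Char × Bool) c =>
      if c = '-' ∨ c = '_' then (st.1, true)
      else (st.1 ++ [if st.2 then PySem.Chars.upperChar c else c], false))
    ([], true)
  String.mk r.1

-- ===== PRECONDITION & SPEC =====
-- Pre_ excludes only the empty string, on which the Python A raises IndexError at l[0].
def Pre_dash_to_studly (s : String) : Prop := s ≠ ""
instance (s : String) : Decidable (Pre_dash_to_studly s) := by unfold Pre_dash_to_studly; infer_instance
def pvWitness_dash_to_studly : String := "dash_to-studly"

def Spec_dash_to_studly (s : String) (out : String) : Prop := out = dash_to_studly_alt s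
instance (s : String) (out : String) : Decidable (Spec_dash_to_studly s out) := by unfold Spec_dash_to_studly; infer_instance

-- ===== CLAIM (what is proved, stated in full; the proofs are below) =====
def Claim_equal_dash_to_studly : Prop := ∀ (s : String), Dom_dash_to_studly s → Pre_dash_to_studly s → Spec_dash_to_studly s (dash_to_studly s)

-- ===== LEMMAS AND PROOFS =====

/-- delimiter test shared by the proofs -/
def pvIsDelim (c : Char) : Bool := c == '-' || c == '_'

/-- A's mark pass, structurally: uppercase the head (if `cap`) and every char following a delimiter. -/
def pvMark : List Char → Bool → List Char
  | [], _ => []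
  | c :: t, cap => (if cap then PySem.Chars.upperChar c else c) :: pvMark t (pvIsDelim c)

/-- the common result: B's state machine. -/
def pvGo : List Char → Bool → List Char
  | [], _ => []
  | c :: t, cap =>
      if pvIsDelim c then pvGo t true
      else (if cap then PySem.Chars.upperChar c else c) :: pvGo t false

lemma pvIsDelim_iff (c : Char) : pvIsDelim c = true ↔ (c = '-' ∨ c = '_') := by
  simp [pvIsDelim]

lemma char_le_toNat {a b : Char} (h : a ≤ b) : a.toNat ≤ b.toNat :=
  UInt32.le_iff_toNat_le.mp h

lemma upper_delim (c : Char) : pvIsDelim (PySem.Chars.upperChar c) = pvIsDelim c := by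
  unfold PySem.Chars.upperChar
  by_cases h : PySem.Chars.islower c = true
  · rw [if_pos h]
    simp only [PySem.Chars.islower, Bool.and_eq_true, decide_eq_true_eq] at h
    have ha := char_le_toNat h.1
    have hz := char_le_toNat h.2
    have e1 : ('a' : Char).toNat = 97 := by decide
    have e2 : ('z' : Char).toNat = 122 := by decide
    have h1 : 97 ≤ c.toNat ∧ c.toNat ≤ 122 := by omega
    have hd1 : pvIsDelim (Char.ofNat (c.toNat - 32)) = false := by
      have hb1 : 65 ≤ c.toNat - 32 := by omega
      have hb2 : c.toNat - 32 ≤ 90 := by omega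
      unfold pvIsDelim
      interval_cases (c.toNat - 32) <;> decide
    have hd2 : pvIsDelim c = false := by
      have hne1 : c ≠ '-' := by
        intro he; rw [he] at h1; revert h1; decide
      have hne2 : c ≠ '_' := by
        intro he; rw [he] at h1; revert h1; decide
      simp [pvIsDelim, hne1, hne2]
    rw [hd1, hd2]
  · rw [if_neg h]

lemma go_zero (d : Char) (l acc : List Char) :
    PySem.Chars.replace.go [d] [] 0 l acc = acc.reverse ++ l := by
  rw [PySem.Chars.replace.go]

lemma go_nil (d : Char) (f : Nat) (acc : List Char) :
    PySem.Chars.replace.go [d] [] (f + 1) [] acc = acc.reverse := by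
  rw [PySem.Chars.replace.go]; simp

lemma go_cons (d : Char) (f : Nat) (c : Char) (t acc : List Char) :
    PySem.Chars.replace.go [d] [] (f + 1) (c :: t) acc =
      if d == c then PySem.Chars.replace.go [d] [] f t acc
      else PySem.Chars.replace.go [d] [] f t (c :: acc) := by
  conv_lhs => rw [PySem.Chars.replace.go]
  by_cases h : d == c <;> simp [List.isPrefixOf, h]

/-- `out.replace(d, "")` on a single character deletes every occurrence of `d`. -/
lemma replace_go_del (d : Char) : ∀ (fuel : Nat) (l acc : List Char), l.length ≤ fuel →
    PySem.Chars.replace.go [d] [] fuel l acc = acc.reverse ++ l.filter (fun c => !(c == d)) := by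
  intro fuel
  induction fuel with
  | zero =>
    intro l acc h
    have hl : l = [] := by cases l <;> simp_all
    subst hl
    rw [go_zero]; simp
  | succ f ih =>
    intro l acc h
    cases l with
    | nil => rw [go_nil]; simp
    | cons c t =>
      rw [go_cons]
      by_cases hc : d == c
      · have hdc : d = c := eq_of_beq hc
        subst hdc
        rw [if_pos (by simp), ih t acc (by simpa using h)]
        simp [List.filter_cons]
      · rw [if_neg hc, ih t (c :: acc) (by simpa using h)]
        have hcd : (c == d) = false := by
          simp only [beq_eq_false_iff_ne, ne_eq]
          intro e; exact hc (by simp [e])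
        simp [List.filter_cons, hcd]

lemma replace_del (d : Char) (l : List Char) :
    PySem.Chars.replace l [d] [] = l.filter (fun c => !(c == d)) := by
  unfold PySem.Chars.replace
  rw [if_neg (by simp)]
  rw [replace_go_del d l.length l [] le_rfl]
  simp

lemma pvMark_length (l : List Char) (cap : Bool) : (pvMark l cap).length = l.length := by
  induction l generalizing cap with
  | nil => rfl
  | cons c t ih => simp [pvMark, ih]

lemma pvMark_getElem (l : List Char) (cap : Bool) (j : Nat) (hj : j < l.length) :
    (pvMark l cap)[j]'(by rw [pvMark_length]; exact hj) =
      if (j = 0 ∧ cap = true) ∨ (1 ≤ j ∧ pvIsDelim (l[j-1]'(by omega)) = true)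
      then PySem.Chars.upperChar (l[j]'hj) else l[j]'hj := by
  induction l generalizing j cap with
  | nil => exact absurd hj (by simp)
  | cons c t ih =>
    cases j with
    | zero =>
      cases cap <;> simp [pvMark]
    | succ n =>
      have hn : n < t.length := by simpa using hj
      have hih := ih (pvIsDelim c) n hn
      cases n with
      | zero =>
        simp only [pvMark, List.getElem_cons_succ] at hih ⊢
        rw [hih]
        refine if_congr ?_ rfl rfl
        constructor
        · rintro (⟨_, hp⟩ | ⟨h1, _⟩)
          · exact Or.inr ⟨by omega, by simpa using hp⟩
          · omega
        · rintro (⟨h0, _⟩ | ⟨_, hp⟩)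
          · omega
          · exact Or.inl ⟨trivial, by simpa using hp⟩
      | succ m =>
        simp only [pvMark, List.getElem_cons_succ] at hih ⊢
        rw [hih]
        refine if_congr ?_ rfl rfl
        constructor
        · rintro (⟨h0, _⟩ | ⟨_, hp⟩)
          · omega
          · exact Or.inr ⟨by omega, by simpa using hp⟩
        · rintro (⟨h0, _⟩ | ⟨_, hp⟩)
          · omega
          · exact Or.inr ⟨by omega, by simpa using hp⟩

/-- pointwise characterisation of port A's index-mutating fold after `k` steps -/
lemma foldA_getElem (l₀ : List Char) : ∀ (k : Nat), k ≤ l₀.length →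
    ((List.range k).foldl (fun acc i =>
      if acc.getD i ' ' = '-' ∨ acc.getD i ' ' = '_' then
        if i + 1 < acc.length then
          acc.set (i + 1) (PySem.Chars.upperChar (acc.getD (i + 1) ' '))
        else acc
      else acc) l₀).length = l₀.length ∧
    ∀ j (hj : j < l₀.length),
      ((List.range k).foldl (fun acc i =>
        if acc.getD i ' ' = '-' ∨ acc.getD i ' ' = '_' then
          if i + 1 < acc.length then
            acc.set (i + 1) (PySem.Chars.upperChar (acc.getD (i + 1) ' '))
          else acc
        else acc) l₀).getD j ' ' =
        if 1 ≤ j ∧ j ≤ k ∧ pvIsDelim (l₀[j-1]'(by omega)) = true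
        then PySem.Chars.upperChar (l₀[j]'hj) else l₀[j]'hj := by
  intro k
  induction k with
  | zero =>
    intro _
    refine ⟨rfl, ?_⟩
    intro j hj
    simp only [List.range_zero, List.foldl_nil]
    rw [List.getD_eq_getElem _ _ hj, if_neg (by omega)]
  | succ k ih =>
    intro hk
    obtain ⟨ihlen, ihget⟩ := ih (by omega)
    rw [List.range_succ, List.foldl_append, List.foldl_cons, List.foldl_nil]
    have hkl : k < l₀.length := by omega
    have hmk := ihget k hkl
    have hdelim :
        ((((List.range k).foldl (fun acc i =>
          if acc.getD i ' ' = '-' ∨ acc.getD i ' ' = '_' then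
            if i + 1 < acc.length then
              acc.set (i + 1) (PySem.Chars.upperChar (acc.getD (i + 1) ' '))
            else acc
          else acc) l₀).getD k ' ' = '-') ∨
         (((List.range k).foldl (fun acc i =>
          if acc.getD i ' ' = '-' ∨ acc.getD i ' ' = '_' then
            if i + 1 < acc.length then
              acc.set (i + 1) (PySem.Chars.upperChar (acc.getD (i + 1) ' '))
            else acc
          else acc) l₀).getD k ' ' = '_')) ↔ pvIsDelim (l₀[k]'hkl) = true := by
      rw [hmk]
      split_ifs with hsp
      · rw [← pvIsDelim_iff, upper_delim]
      · rw [← pvIsDelim_iff]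
    by_cases hd : pvIsDelim (l₀[k]'hkl) = true
    · rw [if_pos (hdelim.mpr hd)]
      by_cases hlt : k + 1 <
          ((List.range k).foldl (fun acc i =>
            if acc.getD i ' ' = '-' ∨ acc.getD i ' ' = '_' then
              if i + 1 < acc.length then
                acc.set (i + 1) (PySem.Chars.upperChar (acc.getD (i + 1) ' '))
              else acc
            else acc) l₀).length
      · rw [if_pos hlt]
        have hk1 : k + 1 < l₀.length := by rwa [ihlen] at hlt
        constructor
        · rw [List.length_set, ihlen]
        · intro j hj
          have hmk1 := ihget (k + 1) hk1
          rw [if_neg (by omega)] at hmk1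
          by_cases hjk : j = k + 1
          · subst hjk
            rw [List.getD_eq_getElem _ _ (by rw [List.length_set, ihlen]; exact hk1)]
            rw [List.getElem_set]
            rw [if_pos rfl]
            rw [hmk1]
            rw [if_pos ⟨by omega, by omega, by simpa using hd⟩]
          · rw [List.getD_eq_getElem _ _ (by rw [List.length_set, ihlen]; exact hj)]
            rw [List.getElem_set, if_neg (fun e => hjk e.symm)]
            rw [← List.getD_eq_getElem _ ' ' (by rw [ihlen]; exact hj), ihget j hj]
            exact if_congr (by
              constructor
              · rintro ⟨a, b, cc⟩; exact ⟨a, by omega, cc⟩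
              · rintro ⟨a, b, cc⟩; exact ⟨a, by omega, cc⟩) rfl rfl
      · rw [if_neg hlt]
        refine ⟨ihlen, ?_⟩
        intro j hj
        rw [ihget j hj]
        have hnk : ¬ (k + 1 < l₀.length) := by rwa [ihlen] at hlt
        exact if_congr (by
          constructor
          · rintro ⟨a, b, cc⟩; exact ⟨a, by omega, cc⟩
          · rintro ⟨a, b, cc⟩; exact ⟨a, by omega, cc⟩) rfl rfl
    · rw [if_neg (fun hc => hd (hdelim.mp hc))]
      refine ⟨ihlen, ?_⟩
      intro j hj
      rw [ihget j hj]
      refine if_congr ?_ rfl rfl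
      constructor
      · rintro ⟨a, b, cc⟩; exact ⟨a, by omega, cc⟩
      · rintro ⟨a, b, cc⟩
        refine ⟨a, ?_, cc⟩
        by_contra hnb
        have hjj : j = k + 1 := by omega
        subst hjj
        exact hd (by simpa using cc)

lemma filter_pvMark (l : List Char) (cap : Bool) :
    (pvMark l cap).filter (fun c => !(pvIsDelim c)) = pvGo l cap := by
  induction l generalizing cap with
  | nil => rfl
  | cons c t ih =>
    by_cases hd : pvIsDelim c = true
    · have h1 : pvIsDelim (if cap then PySem.Chars.upperChar c else c) = true := by
        cases cap <;> simp [upper_delim, hd]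
      simp [pvMark, pvGo, List.filter_cons, h1, hd, ih]
    · rw [Bool.not_eq_true] at hd
      have h1 : pvIsDelim (if cap then PySem.Chars.upperChar c else c) = false := by
        cases cap <;> simp [upper_delim, hd]
      simp [pvMark, pvGo, List.filter_cons, h1, hd, ih]

lemma foldB (l : List Char) (cap : Bool) (acc : List Char) :
    (l.foldl (fun (st : List Char × Bool) c =>
      if c = '-' ∨ c = '_' then (st.1, true)
      else (st.1 ++ [if st.2 then PySem.Chars.upperChar c else c], false)) (acc, cap)).1
      = acc ++ pvGo l cap := by
  induction l generalizing cap acc with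
  | nil => simp [pvGo]
  | cons c t ih =>
    simp only [List.foldl_cons]
    by_cases h : c = '-' ∨ c = '_'
    · rw [if_pos h, ih true acc]
      have hd : pvIsDelim c = true := (pvIsDelim_iff c).mpr h
      simp [pvGo, hd]
    · rw [if_neg h, ih false _]
      have hd : pvIsDelim c = false := by
        rw [← Bool.not_eq_true]
        exact fun hh => h ((pvIsDelim_iff c).mp hh)
      simp [pvGo, hd, List.append_assoc]

lemma filter_delims (m : List Char) :
    (m.filter (fun c => !(c == '-'))).filter (fun c => !(c == '_')) =
      m.filter (fun c => !(pvIsDelim c)) := by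
  rw [List.filter_filter]
  apply List.filter_congr
  intro x _
  cases hx1 : (x == '-') <;> cases hx2 : (x == '_') <;> simp [pvIsDelim, hx1, hx2]

-- ===== VERDICT (by name: the statement is the Claim_ definition above) =====
theorem dash_to_studly_spec : Claim_equal_dash_to_studly := by
  intro s _ _
  unfold Spec_dash_to_studly dash_to_studly dash_to_studly_alt
  cases hxs : s.toList with
  | nil =>
    simp [replace_del]
  | cons c t =>
    dsimp only
    rw [foldB]
    obtain ⟨hlen, hget⟩ :=
      foldA_getElem (PySem.Chars.upperChar c :: t) (PySem.Chars.upperChar c :: t).length le_rfl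
    have hM : ((List.range (PySem.Chars.upperChar c :: t).length).foldl (fun acc i =>
        if acc.getD i ' ' = '-' ∨ acc.getD i ' ' = '_' then
          if i + 1 < acc.length then
            acc.set (i + 1) (PySem.Chars.upperChar (acc.getD (i + 1) ' '))
          else acc
        else acc) (PySem.Chars.upperChar c :: t)) = pvMark (c :: t) true := by
      apply List.ext_getElem
      · rw [hlen, pvMark_length]; simp
      · intro j h1 h2
        have hj : j < (PySem.Chars.upperChar c :: t).length := by rwa [hlen] at h1
        have hval := hget j hj
        rw [List.getD_eq_getElem _ _ h1] at hval
        rw [hval, pvMark_getElem (c :: t) true j (by simpa using hj)]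
        cases j with
        | zero => simp
        | succ n =>
          simp only [List.getElem_cons_succ]
          cases n with
          | zero =>
            refine if_congr ?_ rfl rfl
            constructor
            · rintro ⟨a, b, cc⟩
              exact Or.inr ⟨by omega, by simpa [upper_delim] using cc⟩
            · rintro (⟨h0, _⟩ | ⟨_, cc⟩)
              · omega
              · exact ⟨by omega, by simpa using hj, by simpa [upper_delim] using cc⟩
          | succ m =>
            refine if_congr ?_ rfl rfl
            constructor
            · rintro ⟨a, b, cc⟩
              exact Or.inr ⟨by omega, by simpa using cc⟩
            · rintro (⟨h0, _⟩ | ⟨_, cc⟩)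
              · omega
              · exact ⟨by omega, by have h' := hj; simp at h' ⊢; omega, by simpa using cc⟩
    rw [hM]
    rw [List.foldl_cons, List.foldl_cons, List.foldl_nil]
    rw [replace_del, replace_del, filter_delims, filter_pvMark]
    simp
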